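-- pv_equiv track=rewrite | github.com/ictcubeMENA/Training_one | codewars/6kyu/dinamuh/TickToward/main.py | tick_toward
-- ===== SOURCE A (Python) =====
-- def tick_toward(start, target):
--     lst = [start]
--     v = abs(target[0] - start[0])
--     w = abs(target[1] - start[1])
--     number = max(v, w)
--     i = 0
--     while i < number:
--         if lst[i][0] < target[0]:
--             x = lst[i][0] + 1
--         elif lst[i][0] > target[0]:
--             x = lst[i][0] - 1
--         else:
--             x = lst[i][0]
--
--         if lst[i][1] < target[1]:
--             y = lst[i][1] + 1
--         elif lst[i][1] > target[1]:
--             y = lst[i][1] - 1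
--         else:
--             y = lst[i][1]
--         lst.append((x, y))
--         i += 1
--     return lst
-- ===== SOURCE B (Python) =====
-- def tick_toward(start, target):
--     # closed form per coordinate: after i steps a coordinate is
--     # s + sign(t-s) * min(i, |t-s|)
--     def coord(s, t, i):
--         d = t - s
--         sign = (d > 0) - (d < 0)
--         return s + sign * min(i, abs(d))
--     n = max(abs(target[0] - start[0]), abs(target[1] - start[1]))
--     return [start] + [(coord(start[0], target[0], i + 1),
--                        coord(start[1], target[1], i + 1)) for i in range(n)]
-- ===== Notes on version B (the rewrite author's own statement) =====
-- stated objective: alternative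
-- what changed: Replaces the stateful while-loop that repeatedly steps the last list element by +/-1 with a closed-form position formula s + sign(t-s)*min(i,|t-s|) evaluated independently for each step index in one comprehension.
import Mathlib
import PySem

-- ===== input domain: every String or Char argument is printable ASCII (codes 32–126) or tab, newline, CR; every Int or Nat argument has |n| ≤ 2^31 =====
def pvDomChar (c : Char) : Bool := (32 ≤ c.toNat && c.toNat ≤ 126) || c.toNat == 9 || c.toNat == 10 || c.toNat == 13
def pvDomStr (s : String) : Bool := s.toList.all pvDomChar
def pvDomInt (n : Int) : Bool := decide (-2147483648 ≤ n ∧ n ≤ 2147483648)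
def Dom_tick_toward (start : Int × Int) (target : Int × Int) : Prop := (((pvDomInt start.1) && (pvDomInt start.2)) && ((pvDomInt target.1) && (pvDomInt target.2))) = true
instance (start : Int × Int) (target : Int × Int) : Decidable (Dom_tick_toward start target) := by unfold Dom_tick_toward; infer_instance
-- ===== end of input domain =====

-- B replaces A's stateful step-by-step list construction with a closed-form per-coordinate
-- position formula (objective: alternative; same O(n) cost).
-- ===== PORT A =====
-- A's while loop: each iteration reads the last element and appends its clamped step toward target.
def tickStepA (target : Int × Int) (cur : Int × Int) : Int × Int :=
  let x := if cur.1 < target.1 then cur.1 + 1 else if cur.1 > target.1 then cur.1 - 1 else cur.1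
  let y := if cur.2 < target.2 then cur.2 + 1 else if cur.2 > target.2 then cur.2 - 1 else cur.2
  (x, y)

def tickLoopA (target : Int × Int) (cur : Int × Int) : Nat → List (Int × Int)
  | 0 => []
  | n + 1 =>
    let nxt := tickStepA target cur
    nxt :: tickLoopA target nxt n

def tick_toward (start : Int × Int) (target : Int × Int) : List (Int × Int) :=
  let v := (target.1 - start.1).natAbs
  let w := (target.2 - start.2).natAbs
  let number := max v w
  start :: tickLoopA target start number

-- ===== PORT B =====
-- B: closed-form position after i steps, s + sign(t-s) * min(i, |t-s|)
def coordB (s t i : Int) : Int :=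
  let d := t - s
  let sign := (if d > 0 then (1 : Int) else 0) - (if d < 0 then (1 : Int) else 0)
  s + sign * min i (d.natAbs : Int)

def tick_toward_alt (start : Int × Int) (target : Int × Int) : List (Int × Int) :=
  let n := max (target.1 - start.1).natAbs (target.2 - start.2).natAbs
  start :: (List.range n).map (fun i : Nat =>
    (coordB start.1 target.1 ((i : Int) + 1), coordB start.2 target.2 ((i : Int) + 1)))

-- ===== PRECONDITION & SPEC =====
def Spec_tick_toward (start : Int × Int) (target : Int × Int) (out : List (Int × Int)) : Prop := out = tick_toward_alt start target
instance (start : Int × Int) (target : Int × Int) (out : List (Int × Int)) : Decidable (Spec_tick_toward start target out) := by unfold Spec_tick_toward; infer_instance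

-- ===== CLAIM (what is proved, stated in full; the proofs are below) =====
def Claim_equal_tick_toward : Prop := ∀ (start : Int × Int) (target : Int × Int), Dom_tick_toward start target → Spec_tick_toward start target (tick_toward start target)

-- ===== LEMMAS AND PROOFS =====

-- one-axis step: clamping the closed-form position one step toward t gives the closed form at i+1
lemma coordB_step (s t i : Int) :
    (if coordB s t i < t then coordB s t i + 1
     else if coordB s t i > t then coordB s t i - 1 else coordB s t i) = coordB s t (i + 1) := by
  unfold coordB
  rcases lt_trichotomy s t with h | h | h <;>
    simp only [] <;> split_ifs <;> omega

lemma tickStepA_coordB (start target : Int × Int) (i : Int) :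
    tickStepA target (coordB start.1 target.1 i, coordB start.2 target.2 i)
      = (coordB start.1 target.1 (i + 1), coordB start.2 target.2 (i + 1)) := by
  unfold tickStepA
  simp only []
  rw [coordB_step start.1 target.1 i, coordB_step start.2 target.2 i]

lemma tickLoopA_eq (start target : Int × Int) (k : Nat) (n : Nat) :
    tickLoopA target (coordB start.1 target.1 (k : Int), coordB start.2 target.2 (k : Int)) n
      = (List.range n).map (fun i : Nat =>
          (coordB start.1 target.1 ((k + i + 1 : Nat) : Int),
           coordB start.2 target.2 ((k + i + 1 : Nat) : Int))) := by
  induction n generalizing k with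
  | zero => simp [tickLoopA]
  | succ m ih =>
    rw [List.range_succ_eq_map, List.map_cons, List.map_map]
    simp only [tickLoopA, Function.comp_def]
    rw [tickStepA_coordB start target (k : Int)]
    rw [show ((k : Int) + 1) = ((k + 1 : Nat) : Int) from by push_cast; ring, ih (k + 1)]
    congr 1 <;> simp
    intro a _
    constructor <;> (congr 1 <;> push_cast <;> ring)

lemma coordB_zero (s t : Int) : coordB s t 0 = s := by
  simp only [coordB]
  have : min (0 : Int) ((t - s).natAbs : Int) = 0 := by
    apply min_eq_left; positivity
  rw [this]; ring

-- ===== VERDICT (by name: the statement is the Claim_ definition above) =====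
theorem tick_toward_spec : Claim_equal_tick_toward := by
  intro start target _
  unfold Spec_tick_toward tick_toward tick_toward_alt
  simp only []
  have h := tickLoopA_eq start target 0
      (max (target.1 - start.1).natAbs (target.2 - start.2).natAbs)
  rw [show (coordB start.1 target.1 ((0 : Nat) : Int), coordB start.2 target.2 ((0 : Nat) : Int)) = start
        from by rw [Nat.cast_zero, coordB_zero, coordB_zero]] at h
  rw [h]
  congr 1
  apply List.map_congr_left
  intro i _
  have h1 : ((0 + i + 1 : Nat) : Int) = (i : Int) + 1 := by push_cast; ring
  rw [h1]
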